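-- pv_equiv track=rewrite | github.com/akkey2017/mahjong_discard_model_v2 | single_player.py | deal_initial_hand
-- ===== SOURCE A (Python) =====
-- def tile_sort_key(tile_id):
--     """Get sort key for a tile ID for consistent hand display."""
--     # Sort by suit (m=0, p=1, s=2, z=3) then by number (red 5 sorts as 5)
--     return (tile_id // 10, tile_id % 10 if tile_id % 10 != 0 else 5)
--
-- def deal_initial_hand(wall, player_count=1):
--     """
--     Deal initial hands from the wall.
--
--     Args:
--         wall: List of tile IDs
--         player_count: Number of players (1-4)
--
--     Returns:
--         List of hands (each hand is a list of tile IDs)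
--     """
--     hands = [[] for _ in range(player_count)]
--
--     # Deal 13 tiles to each player
--     for _ in range(13):
--         for i in range(player_count):
--             if wall:
--                 hands[i].append(wall.pop())
--
--     # Sort hands for display
--     for hand in hands:
--         hand.sort(key=tile_sort_key)
--
--     return hands
-- ===== SOURCE B (Python) =====
-- def tile_sort_key(tile_id):
--     """Get sort key for a tile ID for consistent hand display."""
--     return (tile_id // 10, tile_id % 10 if tile_id % 10 != 0 else 5)
--
-- def deal_initial_hand(wall, player_count=1):
--     """Deal 13 tiles each: compute the dealt tail up front by slicing the reversed
--     wall, then distribute it in one flat pass by dealing position (tile k goes to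
--     player k % n), instead of simulating 13 rounds of pops.
--     Mutates wall exactly as the pop loop does (removes the dealt tail)."""
--     n = max(player_count, 0)
--     total = min(13 * n, len(wall))
--     dealt = wall[::-1][:total]
--     del wall[len(wall) - total:]
--     hands = [[] for _ in range(n)]
--     for k, t in enumerate(dealt):
--         hands[k % n].append(t)
--     return [sorted(h, key=tile_sort_key) for h in hands]
-- ===== Notes on version B (the rewrite author's own statement) =====
-- stated objective: alternative
-- what changed: Replaces the 13xplayers pop-and-append mutation loop with an up-front computation: slice the dealt tail off the reversed wall once and gather each player's hand by dealing position (index mod player_count), then sort.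
import Mathlib
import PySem

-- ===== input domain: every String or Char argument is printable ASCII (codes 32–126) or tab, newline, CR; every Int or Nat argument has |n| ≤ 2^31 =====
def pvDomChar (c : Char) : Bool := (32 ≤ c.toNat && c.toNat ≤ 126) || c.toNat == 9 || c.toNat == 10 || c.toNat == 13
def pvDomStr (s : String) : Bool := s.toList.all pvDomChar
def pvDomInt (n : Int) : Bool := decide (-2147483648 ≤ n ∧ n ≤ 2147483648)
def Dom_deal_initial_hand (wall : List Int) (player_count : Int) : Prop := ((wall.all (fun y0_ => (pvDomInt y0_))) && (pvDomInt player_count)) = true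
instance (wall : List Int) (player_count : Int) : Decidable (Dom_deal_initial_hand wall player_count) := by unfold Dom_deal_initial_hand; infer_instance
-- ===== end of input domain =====

-- B replaces A's 13×players pop-and-append mutation loop by slicing the dealt tail
-- off the reversed wall once and gathering each hand by dealing position (alternative
-- decomposition, similar cost). Both Pythons mutate `wall` identically (the dealt tail
-- is removed); the equivalence proved here is about the RETURN value.

-- ===== PORT A =====
-- tile_sort_key returns the tuple (tile_id // 10, tile_id % 10 if tile_id % 10 != 0 else 5);
-- the two components are passed to sorted2 (Python's lexicographic tuple key).
def pvTileKey1 (t : Int) : Int := PySem.Int.floordiv t 10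
def pvTileKey2 (t : Int) : Int := if PySem.Int.mod t 10 ≠ 0 then PySem.Int.mod t 10 else 5

-- body of A's inner loop: `if wall: hands[i].append(wall.pop())` on state (wall, hands)
def pvDealStep (st : List Int × List (List Int)) (i : Int) : List Int × List (List Int) :=
  match PySem.List.pop? st.1 with
  | some (v, rest) => (rest, st.2.modify i.toNat (· ++ [v]))
  | none => st

def deal_initial_hand (wall : List Int) (player_count : Int) : List (List Int) :=
  let hands : List (List Int) := (PySem.List.pyRange 0 player_count).map (fun _ => ([] : List Int))
  let st := (PySem.List.pyRange 0 13).foldl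
    (fun st _ => (PySem.List.pyRange 0 player_count).foldl pvDealStep st)
    (wall, hands)
  st.2.map (fun h => PySem.List.sorted2 h pvTileKey1 pvTileKey2)

-- ===== PORT B =====
def deal_initial_hand_alt (wall : List Int) (player_count : Int) : List (List Int) :=
  let n : Int := max player_count 0
  let total : Int := min (13 * n) (wall.length : Int)
  -- wall[::-1][:total]; slice? with step -1 never raises (slice?_none_none_neg_one), so getD is unreachable
  let dealt : List Int := PySem.List.slice ((PySem.List.slice? wall none none (-1)).getD []) none (some total)
  let hands0 : List (List Int) := (PySem.List.pyRange 0 n).map (fun _ => ([] : List Int))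
  let hands := (PySem.List.enumerate dealt).foldl
    (fun hs kt => hs.modify (PySem.Int.mod kt.1 n).toNat (· ++ [kt.2])) hands0
  hands.map (fun h => PySem.List.sorted2 h pvTileKey1 pvTileKey2)

-- ===== PRECONDITION & SPEC =====
def Spec_deal_initial_hand (wall : List Int) (player_count : Int) (out : List (List Int)) : Prop := out = deal_initial_hand_alt wall player_count
instance (wall : List Int) (player_count : Int) (out : List (List Int)) : Decidable (Spec_deal_initial_hand wall player_count out) := by unfold Spec_deal_initial_hand; infer_instance

-- ===== CLAIM (what is proved, stated in full; the proofs are below) =====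
def Claim_equal_deal_initial_hand : Prop := ∀ (wall : List Int) (player_count : Int), Dom_deal_initial_hand wall player_count → Spec_deal_initial_hand wall player_count (deal_initial_hand wall player_count)

-- ===== LEMMAS AND PROOFS =====

-- scatter one (player, tile) pair into the hands list (A's `hands[i].append(v)`)
def pvUpd (hs : List (List Int)) (p : Int × Int) : List (List Int) :=
  hs.modify p.1.toNat (· ++ [p.2])

-- A's pop loop, run on wall = rv.reverse, pops the elements of rv in order and
-- scatters them to the player indices ks, pairwise (zip truncates at exhaustion).
lemma pv_run_spec (ks : List Int) : ∀ (rv : List Int) (hs : List (List Int)),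
    ks.foldl pvDealStep (rv.reverse, hs)
      = ((rv.drop ks.length).reverse, (ks.zip rv).foldl pvUpd hs) := by
  induction ks with
  | nil => intro rv hs; simp
  | cons k ks ih =>
    intro rv hs
    cases rv with
    | nil => simpa [pvDealStep, PySem.List.pop?] using ih [] hs
    | cons v rv' =>
      have h1 : (v :: rv').reverse = rv'.reverse ++ [v] := by simp
      rw [h1]
      show List.foldl pvDealStep (pvDealStep (rv'.reverse ++ [v], hs) k) ks = _
      rw [show pvDealStep (rv'.reverse ++ [v], hs) k = (rv'.reverse, pvUpd hs (k, v)) by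
        simp [pvDealStep, PySem.List.pop?_last, pvUpd]]
      rw [ih rv' (pvUpd hs (k, v))]
      simp

lemma pv_run_spec' (ks : List Int) (w : List Int) (hs : List (List Int)) :
    ks.foldl pvDealStep (w, hs)
      = ((w.reverse.drop ks.length).reverse, (ks.zip w.reverse).foldl pvUpd hs) := by
  simpa using pv_run_spec ks w.reverse hs

-- the outer `for _ in range(13)` loop is the inner loop run on 13 concatenated copies
lemma pv_outer (R : List Int) (l : List Int) : ∀ st,
    l.foldl (fun st _ => R.foldl pvDealStep st) st
      = ((List.replicate l.length R).flatten).foldl pvDealStep st := by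
  induction l with
  | nil => intro st; simp
  | cons x l ih => intro st; simp [List.replicate_succ, List.foldl_append, ih]

lemma pv_chunk (pc a : Int) (hpc : 0 < pc) :
    (PySem.List.pyRange (a * pc) (a * pc + pc)).map (fun j => PySem.Int.mod j pc)
      = PySem.List.pyRange 0 pc := by
  rw [PySem.List.pyRange_one (a * pc) (a * pc + pc), PySem.List.pyRange_one 0 pc]
  simp only [add_sub_cancel_left, Int.sub_zero, List.map_map]
  apply List.map_congr_left
  intro k hk
  have hk' : (k : Int) < pc := by
    have := List.mem_range.mp hk; omega
  simp only [Function.comp]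
  rw [PySem.Int.mod_eq_emod_of_pos hpc]
  rw [show a * pc + (k : Int) = (k : Int) + pc * a by ring, Int.add_mul_emod_self_left]
  rw [Int.emod_eq_of_lt (by positivity) hk']
  omega

-- m concatenated copies of range(pc) are the residues j % pc of j in range(m*pc)
lemma pv_copies (pc : Int) (hpc : 0 < pc) : ∀ (m : Nat),
    (List.replicate m (PySem.List.pyRange 0 pc)).flatten
      = (PySem.List.pyRange 0 ((m : Int) * pc)).map (fun j => PySem.Int.mod j pc) := by
  intro m
  induction m with
  | zero => simp [PySem.List.pyRange_one_eq_nil]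
  | succ m ih =>
    rw [List.replicate_succ', List.flatten_append, ih]
    simp only [List.flatten_cons, List.flatten_nil, List.append_nil]
    rw [show ((m + 1 : Nat) : Int) * pc = (m : Int) * pc + pc by push_cast; ring]
    rw [PySem.List.pyRange_one_append 0 ((m : Int) * pc) ((m : Int) * pc + pc)
      (by positivity) (by linarith)]
    rw [List.map_append, pv_chunk pc m hpc]

-- range(M) zipped against rv is the enumeration of rv's first min(M, len(rv)) elements
lemma pv_zip_enum (M : Int) (hM : 0 ≤ M) (rv : List Int) :
    (PySem.List.pyRange 0 M).zip rv
      = PySem.List.enumerate (rv.take (min M (rv.length : Int)).toNat) 0 := by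
  apply List.ext_getElem
  · simp [PySem.List.length_pyRange_one, PySem.List.enumerate_eq_zipIdx_map]
    omega
  · intro k h1 h2
    have hk1 : k < M.toNat := by
      simp [PySem.List.length_pyRange_one] at h1; omega
    have hk2 : k < rv.length := by
      simp [PySem.List.length_pyRange_one] at h1; omega
    simp [List.getElem_zip, PySem.List.enumerate_eq_zipIdx_map, List.getElem_zipIdx,
      PySem.List.getElem_pyRange_one, List.getElem_take]

-- ===== VERDICT (by name: the statement is the Claim_ definition above) =====
theorem deal_initial_hand_spec : Claim_equal_deal_initial_hand := by
  intro wall pc _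
  show deal_initial_hand wall pc = deal_initial_hand_alt wall pc
  unfold deal_initial_hand deal_initial_hand_alt
  dsimp only
  rcases le_or_gt pc 0 with hpc | hpc
  · have hmax : max pc 0 = 0 := max_eq_right hpc
    rw [hmax]
    have htot : min (13 * (0 : Int)) ((wall.length : Nat) : Int) = 0 := by omega
    rw [htot, PySem.List.slice?_none_none_neg_one, Option.getD_some,
      PySem.List.slice_to _ (by omega : (0 : Int) ≤ 0)]
    simp [PySem.List.pyRange_one_eq_nil hpc, PySem.List.pyRange_one_eq_nil (le_refl (0 : Int))]
  · have hmax : max pc 0 = pc := max_eq_left hpc.le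
    rw [hmax]
    rw [pv_outer, pv_copies pc hpc]
    rw [show ((PySem.List.pyRange 0 13).length : Int) * pc = 13 * pc by
      simp [PySem.List.length_pyRange_one]]
    rw [pv_run_spec']
    -- B's dealt list
    rw [PySem.List.slice?_none_none_neg_one, Option.getD_some,
      PySem.List.slice_to _ (by omega : (0 : Int) ≤ min (13 * pc) (wall.length : Int))]
    set rv := wall.reverse with hrv
    set dealt := rv.take (min (13 * pc) ((wall.length : Nat) : Int)).toNat with hdealt
    have hzip : ((PySem.List.pyRange 0 (13 * pc)).map (fun j => PySem.Int.mod j pc)).zip rv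
        = (PySem.List.enumerate dealt 0).map (fun kt => (PySem.Int.mod kt.1 pc, kt.2)) := by
      rw [List.zip_map_left, pv_zip_enum (13 * pc) (by positivity) rv]
      have : (rv.length : Int) = (wall.length : Int) := by simp [hrv]
      rw [this]
      apply List.map_congr_left
      intro p _; rfl
    rw [hzip]
    dsimp only
    rw [List.foldl_map]
    rfl
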